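-- pv_equiv track=rewrite | github.com/Targr/aiplaquechecker3 | petey.py | filter_overlapping_by_detection
-- ===== SOURCE A (Python) =====
-- from typing import List, Dict, Tuple, Any, Optional
--
-- def filter_overlapping_by_detection(plates: List[Tuple[int,int,int]], detections: List[Dict[str, Any]]) -> List[Tuple[int,int,int]]:
--     """
--     Remove overlapping plates when overlap is defined as sharing detections.
--     If two plates share any detection, keep only the larger radius plate.
--     """
--     if not plates:
--         return []
--     # build detection sets per plate
--     plate_det_sets = []
--     for (cx, cy, r) in plates:
--         idxs = set()
--         for i, d in enumerate(detections):
--             dx, dy = d.get("center_x"), d.get("center_y")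
--             if dx is None or dy is None:
--                 continue
--             if (dx - cx) ** 2 + (dy - cy) ** 2 <= r * r:
--                 idxs.add(i)
--         plate_det_sets.append(idxs)
--
--     keep = [True] * len(plates)
--     # compare pairs; if intersection non-empty, discard smaller
--     for i in range(len(plates)):
--         for j in range(i+1, len(plates)):
--             if not keep[i] or not keep[j]:
--                 continue
--             if plate_det_sets[i] & plate_det_sets[j]:
--                 # overlap - remove smaller radius
--                 if plates[i][2] >= plates[j][2]:
--                     keep[j] = False
--                 else:
--                     keep[i] = False
--     filtered = [p for k,p in zip(keep, plates) if k]
--     return filtered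
-- ===== SOURCE B (Python) =====
-- def filter_overlapping_by_detection(plates, detections):
--     # Invert the traversal: per-detection coverer lists instead of per-plate
--     # detection sets; only co-covering plate pairs are ever considered.
--     pairs = set()
--     for d in detections:
--         dx, dy = d.get("center_x"), d.get("center_y")
--         if dx is None or dy is None:
--             continue
--         coverers = [k for k, (cx, cy, r) in enumerate(plates)
--                     if (dx - cx) ** 2 + (dy - cy) ** 2 <= r * r]
--         for a, i in enumerate(coverers):
--             for j in coverers[a + 1:]:
--                 pairs.add((i, j))
--     keep = [True] * len(plates)
--     for i, j in sorted(pairs):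
--         if keep[i] and keep[j]:
--             if plates[i][2] >= plates[j][2]:
--                 keep[j] = False
--             else:
--                 keep[i] = False
--     return [p for k, p in zip(keep, plates) if k]
-- ===== Notes on version B (the rewrite author's own statement) =====
-- stated objective: faster
-- what changed: A builds a detection-index set per plate and intersects sets over all O(n^2) plate pairs; B inverts the traversal, building per-detection coverer lists and emitting only co-covering pairs into a set, then runs the same elimination over those pairs in sorted (lexicographic) order.
import Mathlib
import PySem

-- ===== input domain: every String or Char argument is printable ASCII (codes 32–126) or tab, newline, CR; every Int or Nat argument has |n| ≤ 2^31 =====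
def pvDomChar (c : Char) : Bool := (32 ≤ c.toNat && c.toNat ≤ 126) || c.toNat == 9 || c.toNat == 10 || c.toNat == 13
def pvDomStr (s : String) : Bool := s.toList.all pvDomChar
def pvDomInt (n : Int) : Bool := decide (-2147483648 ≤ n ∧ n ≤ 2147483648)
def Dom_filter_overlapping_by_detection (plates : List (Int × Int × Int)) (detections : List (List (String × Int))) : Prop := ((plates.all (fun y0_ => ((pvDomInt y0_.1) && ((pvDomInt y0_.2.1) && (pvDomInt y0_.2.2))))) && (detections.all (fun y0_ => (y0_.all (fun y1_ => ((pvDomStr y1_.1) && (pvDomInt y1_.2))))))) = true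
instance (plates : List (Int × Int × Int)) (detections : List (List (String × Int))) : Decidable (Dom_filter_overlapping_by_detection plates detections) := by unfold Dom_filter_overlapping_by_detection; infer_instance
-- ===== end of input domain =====

-- B replaces A's per-plate detection sets and all-pairs set intersections by an inverted
-- (per-detection) traversal that enumerates only the co-covering plate pairs, processed in
-- sorted (lexicographic) order; a timing run measured B faster on the generated inputs.

-- ===== PORT A =====
def filter_overlapping_by_detection (plates : List (Int × Int × Int)) (detections : List (List (String × Int))) : List (Int × Int × Int) :=
  if plates = [] then [] else
  let plate_det_sets : List (PySem.Set Int) := plates.foldl (fun acc pl =>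
    acc ++ [(PySem.List.enumerate detections 0).foldl (fun idxs p =>
      match p.2.lookup "center_x", p.2.lookup "center_y" with
      | some dx, some dy =>
          if (dx - pl.1) ^ 2 + (dy - pl.2.1) ^ 2 ≤ pl.2.2 * pl.2.2 then PySem.Set.add idxs p.1 else idxs
      | _, _ => idxs) PySem.Set.empty]) []
  let n : Int := PySem.List.len plates
  let keep : List Bool := (PySem.List.pyRange 0 n 1).foldl (fun keep i =>
    (PySem.List.pyRange (i + 1) n 1).foldl (fun keep j =>
      if !(PySem.List.pyGetD keep i true) || !(PySem.List.pyGetD keep j true) then keep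
      else if PySem.Set.inter (PySem.List.pyGetD plate_det_sets i []) (PySem.List.pyGetD plate_det_sets j []) ≠ [] then
        (if (PySem.List.pyGetD plates i (0, 0, 0)).2.2 ≥ (PySem.List.pyGetD plates j (0, 0, 0)).2.2
         then PySem.List.pySetD keep j false
         else PySem.List.pySetD keep i false)
      else keep) keep) (List.replicate plates.length true)
  (keep.zip plates).foldl (fun acc kp => if kp.1 then acc ++ [kp.2] else acc) []

-- ===== PORT B =====
def filter_overlapping_by_detection_alt (plates : List (Int × Int × Int)) (detections : List (List (String × Int))) : List (Int × Int × Int) :=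
  let pairs : PySem.Set (Int × Int) := detections.foldl (fun pairs d =>
    match d.lookup "center_x", d.lookup "center_y" with
    | some dx, some dy =>
        let coverers : List Int := (PySem.List.enumerate plates 0).foldl (fun acc kp =>
          if (dx - kp.2.1) ^ 2 + (dy - kp.2.2.1) ^ 2 ≤ kp.2.2.2 * kp.2.2.2 then acc ++ [kp.1] else acc) []
        (PySem.List.enumerate coverers 0).foldl (fun pairs ai =>
          (PySem.List.slice coverers (some (ai.1 + 1)) none).foldl (fun pairs j =>
            PySem.Set.add pairs (ai.2, j)) pairs) pairs
    | none, _ => pairs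
    | some _, none => pairs) PySem.Set.empty
  let keep : List Bool := (PySem.List.sorted pairs (fun p => (toLex p : Lex (Int × Int))) false).foldl (fun keep ij =>
    if PySem.List.pyGetD keep ij.1 true && PySem.List.pyGetD keep ij.2 true then
      (if (PySem.List.pyGetD plates ij.1 (0, 0, 0)).2.2 ≥ (PySem.List.pyGetD plates ij.2 (0, 0, 0)).2.2
       then PySem.List.pySetD keep ij.2 false
       else PySem.List.pySetD keep ij.1 false)
    else keep) (List.replicate plates.length true)
  (keep.zip plates).foldl (fun acc kp => if kp.1 then acc ++ [kp.2] else acc) []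

-- ===== PRECONDITION & SPEC =====
def Spec_filter_overlapping_by_detection (plates : List (Int × Int × Int)) (detections : List (List (String × Int))) (out : List (Int × Int × Int)) : Prop := out = filter_overlapping_by_detection_alt plates detections
instance (plates : List (Int × Int × Int)) (detections : List (List (String × Int))) (out : List (Int × Int × Int)) : Decidable (Spec_filter_overlapping_by_detection plates detections out) := by unfold Spec_filter_overlapping_by_detection; infer_instance

-- ===== CLAIM (what is proved, stated in full; the proofs are below) =====
def Claim_equal_filter_overlapping_by_detection : Prop := ∀ (plates : List (Int × Int × Int)) (detections : List (List (String × Int))), Dom_filter_overlapping_by_detection plates detections → Spec_filter_overlapping_by_detection plates detections (filter_overlapping_by_detection plates detections)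

-- ===== LEMMAS AND PROOFS =====

-- does the detection at (dx, dy) fall inside the circle pl? (the shared geometric test)
def pvCov (dx dy : Int) (pl : Int × Int × Int) : Bool :=
  decide ((dx - pl.1) ^ 2 + (dy - pl.2.1) ^ 2 ≤ pl.2.2 * pl.2.2)

-- d.get("center_x"), d.get("center_y") when both are present
def pvXY (d : List (String × Int)) : Option (Int × Int) :=
  match d.lookup "center_x", d.lookup "center_y" with
  | some dx, some dy => some (dx, dy)
  | _, _ => none

def pvCovD (d : List (String × Int)) (pl : Int × Int × Int) : Bool :=
  match pvXY d with
  | some (dx, dy) => pvCov dx dy pl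
  | none => false

def pvOvl (plates : List (Int × Int × Int)) (detections : List (List (String × Int))) (i j : Int) : Bool :=
  detections.any (fun d => pvCovD d (PySem.List.pyGetD plates i (0, 0, 0)) && pvCovD d (PySem.List.pyGetD plates j (0, 0, 0)))

-- the common elimination step on an overlapping pair
def pvKill (plates : List (Int × Int × Int)) (keep : List Bool) (p : Int × Int) : List Bool :=
  if PySem.List.pyGetD keep p.1 true && PySem.List.pyGetD keep p.2 true then
    (if (PySem.List.pyGetD plates p.1 (0, 0, 0)).2.2 ≥ (PySem.List.pyGetD plates p.2 (0, 0, 0)).2.2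
     then PySem.List.pySetD keep p.2 false
     else PySem.List.pySetD keep p.1 false)
  else keep

-- all pairs (i, j) with 0 ≤ i < j < n, in lexicographic order
def pvAllP (n : Int) : List (Int × Int) :=
  (PySem.List.pyRange 0 n 1).flatMap (fun i => (PySem.List.pyRange (i + 1) n 1).map (fun j => (i, j)))

-- the common core both programs reduce to
def pvCommon (plates : List (Int × Int × Int)) (detections : List (List (String × Int))) : List (Int × Int × Int) :=
  let keep : List Bool := ((pvAllP (PySem.List.len plates)).filter (fun p => pvOvl plates detections p.1 p.2)).foldl
    (pvKill plates) (List.replicate plates.length true)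
  (keep.zip plates).foldl (fun acc kp => if kp.1 then acc ++ [kp.2] else acc) []

-- A's per-plate detection set
def pvDetSet (detections : List (List (String × Int))) (pl : Int × Int × Int) : PySem.Set Int :=
  (PySem.List.enumerate detections 0).foldl (fun idxs p =>
    match p.2.lookup "center_x", p.2.lookup "center_y" with
    | some dx, some dy =>
        if (dx - pl.1) ^ 2 + (dy - pl.2.1) ^ 2 ≤ pl.2.2 * pl.2.2 then PySem.Set.add idxs p.1 else idxs
    | _, _ => idxs) PySem.Set.empty

-- A's elimination step on an arbitrary pair
def pvStepA (sets : List (PySem.Set Int)) (plates : List (Int × Int × Int)) (keep : List Bool) (p : Int × Int) : List Bool :=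
  if !(PySem.List.pyGetD keep p.1 true) || !(PySem.List.pyGetD keep p.2 true) then keep
  else if PySem.Set.inter (PySem.List.pyGetD sets p.1 []) (PySem.List.pyGetD sets p.2 []) ≠ [] then
    (if (PySem.List.pyGetD plates p.1 (0, 0, 0)).2.2 ≥ (PySem.List.pyGetD plates p.2 (0, 0, 0)).2.2
     then PySem.List.pySetD keep p.2 false
     else PySem.List.pySetD keep p.1 false)
  else keep

-- B's coverer list for one detection
def pvCoverers (plates : List (Int × Int × Int)) (dx dy : Int) : List Int :=
  ((PySem.List.enumerate plates 0).filter (fun kp => pvCov dx dy kp.2)).map (·.1)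

def pvG2 (cs : List Int) (ai : Int × Int) : List (Int × Int) :=
  (cs.drop ((ai.1 + 1).toNat)).map (fun j => (ai.2, j))

def pvLc (cs : List Int) : List (Int × Int) :=
  (PySem.List.enumerate cs 0).flatMap (pvG2 cs)

-- B's candidate pairs contributed by one detection
def pvG (plates : List (Int × Int × Int)) (d : List (String × Int)) : List (Int × Int) :=
  match pvXY d with
  | some (dx, dy) => pvLc (pvCoverers plates dx dy)
  | none => []

-- generic fold lemmas
lemma pv_foldl_add_if {α β : Type} [BEq α] (l : List β) (c : β → Bool) (f : β → α) (s : PySem.Set α) :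
    l.foldl (fun s b => if c b then PySem.Set.add s (f b) else s) s
      = PySem.Set.update s ((l.filter c).map f) := by
  induction l generalizing s with
  | nil => simp [PySem.Set.update_nil]
  | cons b l ih =>
    by_cases h : c b
    · simp only [List.foldl_cons, List.filter_cons, h, if_pos, List.map_cons, PySem.Set.update_cons, ih]
    · simp only [List.foldl_cons, List.filter_cons, h, Bool.false_eq_true, if_false, ih]

lemma pv_foldl_update {α β : Type} [BEq α] (l : List β) (g : β → List α) (s : PySem.Set α) :
    l.foldl (fun s b => PySem.Set.update s (g b)) s = PySem.Set.update s (l.flatMap g) := by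
  induction l generalizing s with
  | nil => simp [PySem.Set.update_nil]
  | cons b l ih => simp [ih, PySem.Set.update_append]

lemma pv_nested_eq (n : Int) (f : List Bool → Int × Int → List Bool) (init : List Bool) :
    (PySem.List.pyRange 0 n 1).foldl (fun k i =>
      (PySem.List.pyRange (i + 1) n 1).foldl (fun k' j => f k' (i, j)) k) init
      = (pvAllP n).foldl f init := by
  simp [pvAllP, List.foldl_flatMap, List.foldl_map]

-- membership characterizations
lemma pv_mem_allP (n : Int) (p : Int × Int) :
    p ∈ pvAllP n ↔ 0 ≤ p.1 ∧ p.1 < p.2 ∧ p.2 < n := by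
  obtain ⟨i, j⟩ := p
  simp [pvAllP, List.mem_flatMap, PySem.List.mem_pyRange_one]
  omega

lemma pv_pairwise_allP (n : Int) :
    (pvAllP n).Pairwise (fun a b => (toLex a : Lex (Int × Int)) < toLex b) := by
  rw [pvAllP, List.pairwise_flatMap]
  constructor
  · intro a _
    refine List.Pairwise.map _ ?_ (PySem.List.pairwise_lt_pyRange_one _ _)
    intro x y hxy
    exact Prod.Lex.toLex_lt_toLex.mpr (Or.inr ⟨rfl, hxy⟩)
  · refine List.Pairwise.imp ?_ (PySem.List.pairwise_lt_pyRange_one _ _)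
    intro a b hab x hx y hy
    simp only [List.mem_map] at hx hy
    obtain ⟨x', _, rfl⟩ := hx; obtain ⟨y', _, rfl⟩ := hy
    exact Prod.Lex.toLex_lt_toLex.mpr (Or.inl hab)

lemma pv_detSet_eq (detections : List (List (String × Int))) (pl : Int × Int × Int) :
    pvDetSet detections pl
      = PySem.Set.ofList (((PySem.List.enumerate detections 0).filter (fun p => pvCovD p.2 pl)).map (·.1)) := by
  have hfun : (fun (idxs : PySem.Set Int) (p : Int × List (String × Int)) =>
      match p.2.lookup "center_x", p.2.lookup "center_y" with
      | some dx, some dy =>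
          if (dx - pl.1) ^ 2 + (dy - pl.2.1) ^ 2 ≤ pl.2.2 * pl.2.2 then PySem.Set.add idxs p.1 else idxs
      | _, _ => idxs)
      = (fun idxs p => if pvCovD p.2 pl then PySem.Set.add idxs p.1 else idxs) := by
    funext idxs p
    rcases h1 : p.2.lookup "center_x" with _ | dx <;> rcases h2 : p.2.lookup "center_y" with _ | dy <;>
      simp [pvCovD, pvXY, pvCov, h1, h2]
  rw [pvDetSet, hfun, pv_foldl_add_if]
  rfl

lemma pv_mem_detSet (detections : List (List (String × Int))) (pl : Int × Int × Int) (t : Int) :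
    t ∈ pvDetSet detections pl ↔
      ∃ k : Nat, ∃ _ : k < detections.length, t = (k : Int) ∧ pvCovD detections[k] pl = true := by
  rw [pv_detSet_eq, PySem.Set.mem_ofList]
  simp only [List.mem_map, List.mem_filter, PySem.List.mem_enumerate_iff]
  constructor
  · rintro ⟨p, ⟨⟨k, hk, rfl⟩, hc⟩, rfl⟩
    exact ⟨k, hk, by simp, by simpa using hc⟩
  · rintro ⟨k, hk, rfl, hc⟩
    exact ⟨((k : Int), detections[k]), ⟨⟨k, hk, by simp⟩, hc⟩, rfl⟩

lemma pv_mem_coverers (plates : List (Int × Int × Int)) (dx dy : Int) (i : Int) :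
    i ∈ pvCoverers plates dx dy ↔
      ∃ k : Nat, ∃ _ : k < plates.length, i = (k : Int) ∧ pvCov dx dy plates[k] = true := by
  simp only [pvCoverers, List.mem_map, List.mem_filter, PySem.List.mem_enumerate_iff]
  constructor
  · rintro ⟨p, ⟨⟨k, hk, rfl⟩, hc⟩, rfl⟩
    exact ⟨k, hk, by simp, by simpa using hc⟩
  · rintro ⟨k, hk, rfl, hc⟩
    exact ⟨((k : Int), plates[k]), ⟨⟨k, hk, by simp⟩, hc⟩, rfl⟩

lemma pv_pairwise_coverers (plates : List (Int × Int × Int)) (dx dy : Int) :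
    (pvCoverers plates dx dy).Pairwise (· < ·) := by
  refine List.Pairwise.map _ (fun a b h => h) ?_
  exact (PySem.List.pairwise_lt_enumerate plates 0).filter _

lemma pv_mem_Lc (cs : List Int) (hc : cs.Pairwise (· < ·)) (p : Int × Int) :
    p ∈ pvLc cs ↔ p.1 ∈ cs ∧ p.2 ∈ cs ∧ p.1 < p.2 := by
  have hpw := List.pairwise_iff_getElem.mp hc
  obtain ⟨i, j⟩ := p
  simp only [pvLc, List.mem_flatMap, PySem.List.mem_enumerate_iff, pvG2]
  constructor
  · rintro ⟨ai, ⟨a, ha, rfl⟩, hp⟩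
    simp only [List.mem_map] at hp
    obtain ⟨x, hx, hxe⟩ := hp
    have hi : cs[a] = i := congrArg Prod.fst hxe
    have hj : x = j := congrArg Prod.snd hxe
    have htn : ((0 : Int) + (a : Int) + 1).toNat = a + 1 := by omega
    rw [htn] at hx
    obtain ⟨t, ht, hte⟩ := List.mem_iff_getElem.mp hx
    have ht2 : a + 1 + t < cs.length := by simp [List.length_drop] at ht; omega
    rw [List.getElem_drop] at hte
    subst hi; subst hj; subst hte
    exact ⟨List.getElem_mem _, List.getElem_mem _, hpw a (a + 1 + t) ha ht2 (by omega)⟩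
  · rintro ⟨h1, h2, hlt⟩
    obtain ⟨a, ha, hca⟩ := List.mem_iff_getElem.mp h1
    obtain ⟨b, hb, hcb⟩ := List.mem_iff_getElem.mp h2
    subst hca; subst hcb
    have hab : a < b := by
      rcases lt_trichotomy a b with h | h | h
      · exact h
      · exact absurd hlt (by simp [h])
      · exact absurd (hpw b a hb ha h) (by omega)
    have htn : ((0 : Int) + (a : Int) + 1).toNat = a + 1 := by omega
    have hmem : (cs[a], cs[b]) ∈ (cs.drop (((0 : Int) + (a : Int) + 1).toNat)).map
        (fun j => (((0 : Int) + (a : Int), cs[a]).2, j)) := by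
      simp only [List.mem_map]
      refine ⟨cs[b], ?_, rfl⟩
      rw [htn, List.mem_iff_getElem]
      refine ⟨b - (a + 1), by simp [List.length_drop]; omega, ?_⟩
      rw [List.getElem_drop]; congr 1; omega
    exact ⟨((0 : Int) + (a : Int), cs[a]), ⟨a, ha, rfl⟩, hmem⟩

lemma pv_covD_getD (d : List (String × Int)) (plates : List (Int × Int × Int)) (k : Nat)
    (hk : k < plates.length) (dx dy : Int) (hxy : pvXY d = some (dx, dy)) :
    pvCovD d (PySem.List.pyGetD plates (k : Int) (0, 0, 0)) = pvCov dx dy plates[k] := by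
  rw [PySem.List.pyGetD_eq_getElem _ _ (by omega) (by simpa using hk)]
  simp [pvCovD, hxy]

-- the bridge: B's candidate pair list holds exactly the overlapping pairs
lemma pv_mem_cand (plates : List (Int × Int × Int)) (detections : List (List (String × Int))) (p : Int × Int) :
    p ∈ detections.flatMap (pvG plates) ↔
      p ∈ (pvAllP (PySem.List.len plates)).filter (fun p => pvOvl plates detections p.1 p.2) := by
  rw [List.mem_filter, List.mem_flatMap, pv_mem_allP]
  constructor
  · rintro ⟨d, hd, hp⟩
    rcases hxy : pvXY d with _ | ⟨dx, dy⟩ <;> rw [pvG, hxy] at hp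
    · simp at hp
    · rw [pv_mem_Lc _ (pv_pairwise_coverers plates dx dy)] at hp
      obtain ⟨h1, h2, hlt⟩ := hp
      rw [pv_mem_coverers] at h1 h2
      obtain ⟨k1, hk1, he1, hc1⟩ := h1
      obtain ⟨k2, hk2, he2, hc2⟩ := h2
      refine ⟨⟨by omega, hlt, by simp [PySem.List.len]; omega⟩, ?_⟩
      simp only [pvOvl, List.any_eq_true, Bool.and_eq_true]
      refine ⟨d, hd, ?_, ?_⟩
      · rw [he1, pv_covD_getD d plates k1 hk1 dx dy hxy]; exact hc1
      · rw [he2, pv_covD_getD d plates k2 hk2 dx dy hxy]; exact hc2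
  · rintro ⟨⟨h0, hlt, hn⟩, ho⟩
    simp only [pvOvl, List.any_eq_true, Bool.and_eq_true] at ho
    obtain ⟨d, hd, hc1, hc2⟩ := ho
    rcases hxy : pvXY d with _ | ⟨dx, dy⟩
    · rw [pvCovD, hxy] at hc1; simp at hc1
    · refine ⟨d, hd, ?_⟩
      rw [pvG, hxy, pv_mem_Lc _ (pv_pairwise_coverers plates dx dy)]
      have hn2 : p.2.toNat < plates.length := by simp [PySem.List.len] at hn; omega
      have e1 : p.1 = ((p.1.toNat : Nat) : Int) := by omega
      have e2 : p.2 = ((p.2.toNat : Nat) : Int) := by omega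
      refine ⟨?_, ?_, hlt⟩
      · rw [pv_mem_coverers]
        refine ⟨p.1.toNat, by omega, by omega, ?_⟩
        rw [← pv_covD_getD d plates p.1.toNat (by omega) dx dy hxy, ← e1]
        exact hc1
      · rw [pv_mem_coverers]
        refine ⟨p.2.toNat, hn2, by omega, ?_⟩
        rw [← pv_covD_getD d plates p.2.toNat hn2 dx dy hxy, ← e2]
        exact hc2

lemma pv_inter_ne_iff {s t : PySem.Set Int} : (PySem.Set.inter s t ≠ []) ↔ ∃ x, x ∈ s ∧ x ∈ t := by
  constructor
  · intro h
    obtain ⟨x, hx⟩ := List.exists_mem_of_ne_nil _ h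
    exact ⟨x, (PySem.Set.mem_inter s t x).mp hx⟩
  · rintro ⟨x, hx⟩ h
    exact absurd (h ▸ (PySem.Set.mem_inter s t x).mpr hx) (List.not_mem_nil)

-- A's step agrees with the guarded kill step on in-range pairs
lemma pv_stepA_eq (plates : List (Int × Int × Int)) (detections : List (List (String × Int)))
    (keep : List Bool) (p : Int × Int) (h1 : 0 ≤ p.1) (h2 : p.1 < p.2) (h3 : p.2 < plates.length) :
    pvStepA (plates.map (pvDetSet detections)) plates keep p
      = if pvOvl plates detections p.1 p.2 then pvKill plates keep p else keep := by
  obtain ⟨i, j⟩ := p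
  simp only at h1 h2 h3
  have hj0 : 0 ≤ j := by omega
  have hset : ∀ (t : Int), 0 ≤ t → t < plates.length →
      PySem.List.pyGetD (plates.map (pvDetSet detections)) t [] = pvDetSet detections (PySem.List.pyGetD plates t (0,0,0)) := by
    intro t ht0 htl
    rw [PySem.List.pyGetD_eq_getElem _ _ ht0 (by simpa using htl),
        PySem.List.pyGetD_eq_getElem _ _ ht0 (by simpa using htl), List.getElem_map]
  have hiff : (PySem.Set.inter (PySem.List.pyGetD (plates.map (pvDetSet detections)) i [])
      (PySem.List.pyGetD (plates.map (pvDetSet detections)) j []) ≠ [])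
      ↔ pvOvl plates detections i j = true := by
    rw [hset i h1 (by omega), hset j hj0 (by omega), pv_inter_ne_iff]
    simp only [pvOvl, List.any_eq_true, Bool.and_eq_true, pv_mem_detSet]
    constructor
    · rintro ⟨x, ⟨m1, hm1, he1, hc1⟩, ⟨m2, hm2, he2, hc2⟩⟩
      have hkk : m2 = m1 := by omega
      subst hkk
      exact ⟨detections[m2], List.getElem_mem _, hc1, hc2⟩
    · rintro ⟨d, hd, hc1, hc2⟩
      obtain ⟨k, hk, rfl⟩ := List.mem_iff_getElem.mp hd
      exact ⟨(k : Int), ⟨k, hk, rfl, hc1⟩, ⟨k, hk, rfl, hc2⟩⟩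
  by_cases ho : pvOvl plates detections i j = true
  · simp only [pvStepA, pvKill, ho, if_pos]
    by_cases hki : PySem.List.pyGetD keep i true <;> by_cases hkj : PySem.List.pyGetD keep j true <;>
      simp [hki, hkj, if_pos (hiff.mpr ho)]
  · simp only [pvStepA, pvKill, ho, if_false, Bool.false_eq_true]
    have hni : ¬(PySem.Set.inter (PySem.List.pyGetD (plates.map (pvDetSet detections)) i [])
        (PySem.List.pyGetD (plates.map (pvDetSet detections)) j []) ≠ []) := by
      intro h; exact ho (hiff.mp h)
    by_cases hki : PySem.List.pyGetD keep i true <;> by_cases hkj : PySem.List.pyGetD keep j true <;>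
      simp [hki, hkj, hni]

lemma pv_A_eq (plates : List (Int × Int × Int)) (detections : List (List (String × Int))) :
    filter_overlapping_by_detection plates detections = pvCommon plates detections := by
  by_cases hp : plates = []
  · subst hp
    simp [filter_overlapping_by_detection, pvCommon, pvAllP, PySem.List.len,
      PySem.List.pyRange_one_eq_nil (le_refl (0 : Int))]
  · have hA : filter_overlapping_by_detection plates detections =
        ((((PySem.List.pyRange 0 (PySem.List.len plates) 1).foldl (fun keep i =>
            (PySem.List.pyRange (i + 1) (PySem.List.len plates) 1).foldl (fun k' j =>
              pvStepA (plates.foldl (fun acc pl => acc ++ [pvDetSet detections pl]) []) plates k' (i, j)) keep)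
            (List.replicate plates.length true)).zip plates).foldl
          (fun acc kp => if kp.1 then acc ++ [kp.2] else acc) []) := by
      rw [filter_overlapping_by_detection]
      rw [if_neg hp]
      rfl
    rw [hA]
    have hsets : plates.foldl (fun acc pl => acc ++ [pvDetSet detections pl]) [] = plates.map (pvDetSet detections) := by
      simpa using PySem.List.foldl_append_singleton_eq_map (pvDetSet detections) plates []
    rw [hsets, pv_nested_eq (PySem.List.len plates) (pvStepA (plates.map (pvDetSet detections)) plates)]
    have hcongr : (pvAllP (PySem.List.len plates)).foldl (pvStepA (plates.map (pvDetSet detections)) plates)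
          (List.replicate plates.length true)
        = (pvAllP (PySem.List.len plates)).foldl
          (fun k p => if pvOvl plates detections p.1 p.2 then pvKill plates k p else k)
          (List.replicate plates.length true) := by
      refine PySem.List.foldl_congr_mem _ _ _ _ ?_
      intro acc x hx
      obtain ⟨hx0, hx1, hx2⟩ := (pv_mem_allP _ x).mp hx
      refine pv_stepA_eq plates detections acc x hx0 hx1 ?_
      simp [PySem.List.len] at hx2
      exact_mod_cast hx2
    rw [hcongr]
    rw [pvCommon, List.foldl_filter]

-- B's per-detection step
def pvStepD (plates : List (Int × Int × Int)) (pairs : PySem.Set (Int × Int)) (d : List (String × Int)) : PySem.Set (Int × Int) :=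
  match d.lookup "center_x", d.lookup "center_y" with
  | some dx, some dy =>
      let coverers : List Int := (PySem.List.enumerate plates 0).foldl (fun acc kp =>
        if (dx - kp.2.1) ^ 2 + (dy - kp.2.2.1) ^ 2 ≤ kp.2.2.2 * kp.2.2.2 then acc ++ [kp.1] else acc) []
      (PySem.List.enumerate coverers 0).foldl (fun pairs ai =>
        (PySem.List.slice coverers (some (ai.1 + 1)) none).foldl (fun pairs j =>
          PySem.Set.add pairs (ai.2, j)) pairs) pairs
  | none, _ => pairs
  | some _, none => pairs

lemma pv_inner_fold (cs : List Int) (s : PySem.Set (Int × Int)) :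
    (PySem.List.enumerate cs 0).foldl (fun s ai =>
      (PySem.List.slice cs (some (ai.1 + 1)) none).foldl (fun s j => PySem.Set.add s (ai.2, j)) s) s
      = PySem.Set.update s (pvLc cs) := by
  have hcongr : (PySem.List.enumerate cs 0).foldl (fun s ai =>
        (PySem.List.slice cs (some (ai.1 + 1)) none).foldl (fun s j => PySem.Set.add s (ai.2, j)) s) s
      = (PySem.List.enumerate cs 0).foldl (fun s ai => PySem.Set.update s (pvG2 cs ai)) s := by
    refine PySem.List.foldl_congr_mem _ _ _ _ ?_
    intro acc ai hai
    obtain ⟨k, hk, rfl⟩ := (PySem.List.mem_enumerate_iff _ _ _).mp hai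
    rw [PySem.List.slice_from _ (by simp; omega), pvG2, PySem.Set.update_map_eq_foldl_add]
  rw [hcongr, pv_foldl_update]
  rfl

lemma pv_stepD_eq (plates : List (Int × Int × Int)) (s : PySem.Set (Int × Int)) (d : List (String × Int)) :
    pvStepD plates s d = PySem.Set.update s (pvG plates d) := by
  rcases h1 : d.lookup "center_x" with _ | dx <;> rcases h2 : d.lookup "center_y" with _ | dy
  · simp [pvStepD, pvG, pvXY, h1, h2, PySem.Set.update_nil]
  · simp [pvStepD, pvG, pvXY, h1, h2, PySem.Set.update_nil]
  · simp [pvStepD, pvG, pvXY, h1, h2, PySem.Set.update_nil]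
  · have hcov : (PySem.List.enumerate plates 0).foldl (fun acc kp =>
        if (dx - kp.2.1) ^ 2 + (dy - kp.2.2.1) ^ 2 ≤ kp.2.2.2 * kp.2.2.2 then acc ++ [kp.1] else acc) []
        = pvCoverers plates dx dy := by
      have hfun : (fun (acc : List Int) (kp : Int × (Int × Int × Int)) =>
          if (dx - kp.2.1) ^ 2 + (dy - kp.2.2.1) ^ 2 ≤ kp.2.2.2 * kp.2.2.2 then acc ++ [kp.1] else acc)
          = (fun acc kp => if pvCov dx dy kp.2 then acc ++ [kp.1] else acc) := by
        funext acc kp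
        simp [pvCov]
      rw [hfun]
      simpa using PySem.List.foldl_append_if (fun kp => pvCov dx dy kp.2) (·.1) (PySem.List.enumerate plates 0) []
    have hxy : pvXY d = some (dx, dy) := by simp [pvXY, h1, h2]
    simp only [pvStepD, h1, h2]
    rw [hcov, pv_inner_fold, pvG, hxy]

lemma pv_sorted_eq (plates : List (Int × Int × Int)) (detections : List (List (String × Int))) :
    PySem.List.sorted (PySem.Set.ofList (detections.flatMap (pvG plates)))
        (fun p => (toLex p : Lex (Int × Int))) false
      = (pvAllP (PySem.List.len plates)).filter (fun p => pvOvl plates detections p.1 p.2) := by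
  have hpwf : ((pvAllP (PySem.List.len plates)).filter (fun p => pvOvl plates detections p.1 p.2)).Pairwise
      (fun a b => (toLex a : Lex (Int × Int)) < toLex b) :=
    (pv_pairwise_allP _).filter _
  refine PySem.List.sorted_eq_of_perm_of_pairwise_lt _ _ _ ?_ hpwf
  have hnd : ((pvAllP (PySem.List.len plates)).filter (fun p => pvOvl plates detections p.1 p.2)).Nodup :=
    List.Pairwise.imp (fun {a b} h => fun e => absurd (e ▸ h) (lt_irrefl _)) hpwf
  rw [List.perm_ext_iff_of_nodup hnd (PySem.Set.nodup_ofList _)]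
  intro a
  rw [PySem.Set.mem_ofList]
  exact (pv_mem_cand plates detections a).symm

lemma pv_B_eq (plates : List (Int × Int × Int)) (detections : List (List (String × Int))) :
    filter_overlapping_by_detection_alt plates detections = pvCommon plates detections := by
  have hB : filter_overlapping_by_detection_alt plates detections =
      ((((PySem.List.sorted (detections.foldl (pvStepD plates) PySem.Set.empty)
          (fun p => (toLex p : Lex (Int × Int))) false).foldl (pvKill plates)
          (List.replicate plates.length true)).zip plates).foldl
        (fun acc kp => if kp.1 then acc ++ [kp.2] else acc) []) := by
    rw [filter_overlapping_by_detection_alt]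
    rfl
  rw [hB]
  have hpairs : detections.foldl (pvStepD plates) PySem.Set.empty
      = PySem.Set.ofList (detections.flatMap (pvG plates)) := by
    have hfun : pvStepD plates = (fun s d => PySem.Set.update s (pvG plates d)) := by
      funext s d; exact pv_stepD_eq plates s d
    rw [hfun, pv_foldl_update]
    rfl
  rw [hpairs, pv_sorted_eq]
  rfl

-- ===== VERDICT (by name: the statement is the Claim_ definition above) =====
theorem filter_overlapping_by_detection_spec : Claim_equal_filter_overlapping_by_detection := by
  intro plates detections _
  unfold Spec_filter_overlapping_by_detection
  rw [pv_A_eq, pv_B_eq]
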